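-- pv_equiv track=rewrite | github.com/enockabere/msafiri-visitor-api | app/services/proof_of_accommodation.py | validate_template_variables
-- ===== SOURCE A (Python) =====
-- from typing import Optional, Dict, Any
--
-- def validate_template_variables(template_html: str) -> Dict[str, bool]:
--     """
--     Check which template variables are used in the template.
--
--     Returns:
--         Dictionary with variable names as keys and boolean values indicating presence
--     """
--     variables = [
--         'participantName',
--         'hotelName',
--         'hotelAddress',
--         'checkInDate',
--         'checkOutDate',
--         'roomType',
--         'eventName',
--         'eventDates',
--         'confirmationNumber',
--         'tenantName',
--     ]
--
--     result = {}
--     for var in variables: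
--         placeholder = f'{{{{{var}}}}}'
--         result[var] = placeholder in template_html
--
--     return result
-- ===== SOURCE B (Python) =====
-- def validate_template_variables(template_html: str):
--     """Single left-to-right scan: at each '{{' take the run of letters and,
--     if it is immediately closed by '}}', record it; then answer the ten
--     fixed variables by set membership."""
--     names = set()
--     rest = template_html
--     while rest:
--         if rest.startswith("{{"):
--             body = rest[2:]
--             name = ""
--             for ch in body:
--                 if not ch.isalpha():
--                     break
--                 name += ch
--             if body[len(name):len(name) + 2] == "}}":
--                 names.add(name)
--         rest = rest[1:]
--
--     variables = [
--         'participantName',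
--         'hotelName',
--         'hotelAddress',
--         'checkInDate',
--         'checkOutDate',
--         'roomType',
--         'eventName',
--         'eventDates',
--         'confirmationNumber',
--         'tenantName',
--     ]
--     return {var: var in names for var in variables}
-- ===== Notes on version B (the rewrite author's own statement) =====
-- stated objective: alternative
-- what changed: Instead of running ten independent whole-string substring searches, B makes one left-to-right scan of the template that collects every letter-run placeholder name immediately closed by a double closing brace into a set, then answers the ten fixed variables by set membership.
import Mathlib
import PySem

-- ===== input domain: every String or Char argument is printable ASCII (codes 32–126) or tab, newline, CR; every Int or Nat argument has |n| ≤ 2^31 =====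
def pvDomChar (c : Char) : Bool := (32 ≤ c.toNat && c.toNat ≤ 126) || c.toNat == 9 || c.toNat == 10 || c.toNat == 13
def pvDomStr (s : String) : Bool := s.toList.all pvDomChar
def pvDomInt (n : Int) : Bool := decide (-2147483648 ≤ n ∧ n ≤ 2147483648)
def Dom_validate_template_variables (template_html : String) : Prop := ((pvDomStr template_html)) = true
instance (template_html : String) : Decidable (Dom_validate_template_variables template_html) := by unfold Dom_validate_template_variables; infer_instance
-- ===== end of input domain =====

-- B replaces A's ten independent whole-string substring searches by ONE left-to-right
-- scan that collects every letter-run placeholder name closed by a brace pair into a set and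
-- answers the ten fixed variables by set membership (objective: alternative).

-- ===== PORT A =====
def pvVariables : List String :=
  ["participantName", "hotelName", "hotelAddress", "checkInDate", "checkOutDate",
   "roomType", "eventName", "eventDates", "confirmationNumber", "tenantName"]

def validate_template_variables (template_html : String) : List (String × Bool) :=
  (pvVariables.foldl
    (fun (result : PySem.Dict String Bool) var =>
      result.insert var (PySem.Str.isIn ("{{" ++ var ++ "}}") template_html))
    PySem.Dict.empty).items

-- ===== PORT B =====
-- the for/break loop of Source B: accumulate the leading letters of `body` into `name`
def pvAlphaPrefix : List Char → List Char → List Char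
  | [], name => name
  | ch :: body, name =>
      if !(PySem.Chars.isalpha ch) then name else pvAlphaPrefix body (name ++ [ch])

-- the while-loop of Source B over the suffixes `rest` of the input
def pvCollect : List Char → PySem.Set String → PySem.Set String
  | [], names => names
  | c :: cs, names =>
      let rest := c :: cs
      let names' :=
        if PySem.Chars.startswith rest ['{', '{'] then
          let body := PySem.List.slice rest (some 2) none
          let name := pvAlphaPrefix body []
          if PySem.List.slice body (some (name.length : Int)) (some ((name.length : Int) + 2)) = ['}', '}'] then
            PySem.Set.add names (String.ofList name)
          else names
        else names
      pvCollect cs names'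

def validate_template_variables_alt (template_html : String) : List (String × Bool) :=
  let names := pvCollect template_html.toList PySem.Set.empty
  pvVariables.map (fun var => (var, PySem.Set.contains names var))

-- ===== PRECONDITION & SPEC =====
def Spec_validate_template_variables (template_html : String) (out : List (String × Bool)) : Prop := out = validate_template_variables_alt template_html
instance (template_html : String) (out : List (String × Bool)) : Decidable (Spec_validate_template_variables template_html out) := by unfold Spec_validate_template_variables; infer_instance

-- ===== CLAIM (what is proved, stated in full; the proofs are below) =====
def Claim_equal_validate_template_variables : Prop := ∀ (template_html : String), Dom_validate_template_variables template_html → Spec_validate_template_variables template_html (validate_template_variables template_html)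

-- ===== LEMMAS AND PROOFS =====

-- "the body of Source B's while loop would add x when it reaches the suffix u"
def pvAddsAt (u : List Char) (x : String) : Prop :=
  PySem.Chars.startswith u ['{', '{'] = true ∧
  PySem.List.slice (PySem.List.slice u (some 2) none)
      (some ((pvAlphaPrefix (PySem.List.slice u (some 2) none) []).length : Int))
      (some (((pvAlphaPrefix (PySem.List.slice u (some 2) none) []).length : Int) + 2)) = ['}', '}'] ∧
  x = String.ofList (pvAlphaPrefix (PySem.List.slice u (some 2) none) [])

lemma pvAlphaPrefix_eq (body acc : List Char) :
    pvAlphaPrefix body acc = acc ++ body.takeWhile PySem.Chars.isalpha := by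
  induction body generalizing acc with
  | nil => simp [pvAlphaPrefix]
  | cons c cs ih =>
      by_cases h : PySem.Chars.isalpha c
      · simp [pvAlphaPrefix, h, ih]
      · simp [pvAlphaPrefix, h]

lemma pv_takeWhile_closed (name rest : List Char)
    (h : ∀ c ∈ name, PySem.Chars.isalpha c = true) :
    (name ++ '}' :: rest).takeWhile PySem.Chars.isalpha = name := by
  induction name with
  | nil =>
      have : PySem.Chars.isalpha '}' = false := by decide
      simp [this]
  | cons c cs ih =>
      simp only [List.cons_append, List.takeWhile_cons, h c (by simp)]
      simp [ih (fun c hc => h c (by simp [hc]))]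

lemma pv_slice_nat_add_two {α : Type} (xs : List α) (n : Nat) :
    PySem.List.slice xs (some (n : Int)) (some ((n : Int) + 2)) = (xs.drop n).take 2 := by
  rw [PySem.List.slice_toNat xs (by positivity) (by positivity)]
  norm_num
  congr 1
  omega

lemma pv_mem_collect (s : List Char) (acc : PySem.Set String) (x : String) :
    x ∈ pvCollect s acc ↔ x ∈ acc ∨ ∃ u, u <:+ s ∧ pvAddsAt u x := by
  induction s generalizing acc with
  | nil =>
      simp only [pvCollect, List.suffix_nil]
      constructor
      · exact fun h => Or.inl h
      · rintro (h | ⟨u, rfl, hsw, _⟩)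
        · exact h
        · exact absurd hsw (by decide)
  | cons c cs ih =>
      simp only [pvCollect]
      rw [ih]
      have hsuffix : ∀ u : List Char, u <:+ c :: cs ↔ u = c :: cs ∨ u <:+ cs :=
        fun u => List.suffix_cons_iff
      by_cases hstart : PySem.Chars.startswith (c :: cs) ['{', '{'] = true
      · by_cases hcl : PySem.List.slice (PySem.List.slice (c :: cs) (some 2) none)
            (some ((pvAlphaPrefix (PySem.List.slice (c :: cs) (some 2) none) []).length : Int))
            (some (((pvAlphaPrefix (PySem.List.slice (c :: cs) (some 2) none) []).length : Int) + 2)) = ['}', '}']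
        · simp only [hstart, if_true, hcl, if_true, PySem.Set.mem_add]
          constructor
          · rintro ((h | h) | h)
            · exact Or.inl h
            · exact Or.inr ⟨c :: cs, List.suffix_refl _, hstart, hcl, h⟩
            · exact Or.inr (h.imp fun u ⟨hu, ha⟩ => ⟨(hsuffix u).mpr (Or.inr hu), ha⟩)
          · rintro (h | ⟨u, hu, ha⟩)
            · exact Or.inl (Or.inl h)
            · rcases (hsuffix u).mp hu with rfl | hu'
              · exact Or.inl (Or.inr ha.2.2)
              · exact Or.inr ⟨u, hu', ha⟩
        · simp only [hstart, if_true, hcl, if_false]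
          constructor
          · rintro (h | h)
            · exact Or.inl h
            · exact Or.inr (h.imp fun u ⟨hu, ha⟩ => ⟨(hsuffix u).mpr (Or.inr hu), ha⟩)
          · rintro (h | ⟨u, hu, ha⟩)
            · exact Or.inl h
            · rcases (hsuffix u).mp hu with rfl | hu'
              · exact absurd ha.2.1 hcl
              · exact Or.inr ⟨u, hu', ha⟩
      · simp only [hstart]
        constructor
        · rintro (h | h)
          · exact Or.inl h
          · exact Or.inr (h.imp fun u ⟨hu, ha⟩ => ⟨(hsuffix u).mpr (Or.inr hu), ha⟩)
        · rintro (h | ⟨u, hu, ha⟩)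
          · exact Or.inl h
          · rcases (hsuffix u).mp hu with rfl | hu'
            · exact absurd ha.1 hstart
            · exact Or.inr ⟨u, hu', ha⟩

lemma pv_addsAt_iff (name : List Char)
    (halpha : ∀ c ∈ name, PySem.Chars.isalpha c = true) (s : List Char) :
    (∃ u, u <:+ s ∧ pvAddsAt u (String.ofList name)) ↔
      ('{' :: '{' :: (name ++ ['}', '}'])) <:+: s := by
  constructor
  · rintro ⟨u, hsuf, hsw, hcl, hx⟩
    obtain ⟨t, rfl⟩ := (PySem.Chars.startswith_iff u ['{', '{']).mp hsw
    have hbody : PySem.List.slice (['{', '{'] ++ t) (some 2) none = t := by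
      rw [PySem.List.slice_from _ (by norm_num)]; rfl
    rw [hbody] at hcl hx
    set nm := pvAlphaPrefix t [] with hnm
    have hname : name = nm := by
      have := congrArg String.toList hx
      simpa using this
    rw [pv_slice_nat_add_two] at hcl
    have hpre : nm <+: t := by
      rw [hnm, pvAlphaPrefix_eq, List.nil_append]
      exact List.takeWhile_prefix _
    obtain ⟨r, hr⟩ := hpre
    have hdrop : t.drop nm.length = r := by
      rw [← hr, List.drop_left]
    rw [hdrop] at hcl
    -- r starts with '}','}'
    obtain ⟨r', hr'⟩ : ∃ r', r = '}' :: '}' :: r' := by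
      rcases r with _ | ⟨a, _ | ⟨b, r'⟩⟩
      · simp at hcl
      · simp at hcl
      · have hab : a = '}' ∧ b = '}' := by simpa using hcl
        exact ⟨r', by rw [hab.1, hab.2]⟩
    apply List.infix_iff_prefix_suffix.mpr
    refine ⟨['{', '{'] ++ t, ⟨r', ?_⟩, hsuf⟩
    rw [hname, ← hr, hr']
    simp [List.append_assoc]
  · intro hinf
    obtain ⟨t, hpre, hsuf⟩ := List.infix_iff_prefix_suffix.mp hinf
    obtain ⟨r, hr⟩ := hpre
    refine ⟨t, hsuf, ?_, ?_, ?_⟩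
    · rw [PySem.Chars.startswith_iff, ← hr]
      exact ⟨name ++ ['}', '}'] ++ r, by simp⟩
    all_goals
      have hbody : PySem.List.slice t (some 2) none = name ++ '}' :: '}' :: r := by
        rw [PySem.List.slice_from _ (by norm_num), ← hr]
        simp
      have hnm : pvAlphaPrefix (PySem.List.slice t (some 2) none) [] = name := by
        rw [hbody, pvAlphaPrefix_eq, List.nil_append, pv_takeWhile_closed _ _ halpha]
    · rw [hnm, hbody, pv_slice_nat_add_two, List.drop_left]
      rfl
    · rw [hnm]

lemma pv_per_var (var : String)
    (halpha : ∀ c ∈ var.toList, PySem.Chars.isalpha c = true) (html : String) :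
    PySem.Str.isIn ("{{" ++ var ++ "}}") html
      = PySem.Set.contains (pvCollect html.toList PySem.Set.empty) var := by
  rw [Bool.eq_iff_iff]
  rw [PySem.Str.isIn_iff_infix, PySem.Set.contains_iff, pv_mem_collect]
  have htl : ("{{" ++ var ++ "}}").toList = '{' :: '{' :: (var.toList ++ ['}', '}']) := by
    simp [String.toList_append]
  have hofl : String.ofList var.toList = var := String.ofList_toList
  rw [htl, ← pv_addsAt_iff var.toList halpha html.toList, hofl]
  simp [PySem.Set.empty]

lemma pv_items (html : String) :
    (pvVariables.foldl
      (fun (result : PySem.Dict String Bool) var =>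
        result.insert var (PySem.Str.isIn ("{{" ++ var ++ "}}") html))
      PySem.Dict.empty).items
      = pvVariables.map (fun var => (var, PySem.Str.isIn ("{{" ++ var ++ "}}") html)) := by
  have h := PySem.Dict.items_foldl_insert_fresh pvVariables (fun v => v)
    (fun var => PySem.Str.isIn ("{{" ++ var ++ "}}") html) PySem.Dict.empty
    (by intro a _; simp) (by simp; decide)
  simpa using h

-- ===== VERDICT (by name: the statement is the Claim_ definition above) =====
theorem validate_template_variables_spec : Claim_equal_validate_template_variables := by
  intro html _
  unfold Spec_validate_template_variables validate_template_variables validate_template_variables_alt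
  rw [pv_items]
  apply List.map_congr_left
  intro var hv
  have halpha : ∀ c ∈ var.toList, PySem.Chars.isalpha c = true := by
    fin_cases hv <;> (simp; try decide)
  rw [pv_per_var var halpha html]
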